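-- pv_equiv track=rewrite | github.com/dsmithnautel/restailor | backend/app/services/voice.py | format_resume_for_narration
-- ===== SOURCE A (Python) =====
-- def format_resume_for_narration(selected_units: list) -> str:
--     """
--     Format selected resume units for natural speech.
--
--     Converts bullet points into a narrative format suitable for
--     text-to-speech.
--     """
--     sections = {}
--
--     for unit in selected_units:
--         section = unit.get("section", "experience")
--         if section not in sections:
--             sections[section] = []
--         sections[section].append(unit)
--
--     narration_parts = []
--
--     # Experience section
--     if "experience" in sections:
--         narration_parts.append("Here's a summary of my professional experience:")
--         for unit in sections["experience"]:
--             org = unit.get("org", "")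
--             role = unit.get("role", "")
--             text = unit.get("text", "")
--             if org and role:
--                 narration_parts.append(f"At {org} as {role}: {text}")
--             else:
--                 narration_parts.append(text)
--
--     # Projects section
--     if "projects" in sections:
--         narration_parts.append("Some of my key projects include:")
--         for unit in sections["projects"]:
--             narration_parts.append(unit.get("text", ""))
--
--     # Education section
--     if "education" in sections:
--         narration_parts.append("Regarding my education:")
--         for unit in sections["education"]:
--             narration_parts.append(unit.get("text", ""))
--
--     return " ".join(narration_parts)
-- ===== SOURCE B (Python) =====
-- def format_resume_for_narration(selected_units: list) -> str:
--     """Same narration, built by filtering per section in output order (no grouping dict)."""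
--     parts = []
--     for name, header in (
--         ("experience", "Here's a summary of my professional experience:"),
--         ("projects", "Some of my key projects include:"),
--         ("education", "Regarding my education:"),
--     ):
--         filtered = [u for u in selected_units if u.get("section", "experience") == name]
--         if filtered:
--             parts.append(header)
--             for u in filtered:
--                 if name == "experience":
--                     org = u.get("org", "")
--                     role = u.get("role", "")
--                     text = u.get("text", "")
--                     parts.append(f"At {org} as {role}: {text}" if org and role else text)
--                 else:
--                     parts.append(u.get("text", ""))
--     return " ".join(parts)
-- ===== Notes on version B (the rewrite author's own statement) =====
-- stated objective: simpler
-- what changed: B drops A's build-a-dict-of-sections-then-consume-it structure and instead iterates a fixed ordered (section, header) spec, filtering the input list per section and emitting header plus rendered units directly.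
import Mathlib
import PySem

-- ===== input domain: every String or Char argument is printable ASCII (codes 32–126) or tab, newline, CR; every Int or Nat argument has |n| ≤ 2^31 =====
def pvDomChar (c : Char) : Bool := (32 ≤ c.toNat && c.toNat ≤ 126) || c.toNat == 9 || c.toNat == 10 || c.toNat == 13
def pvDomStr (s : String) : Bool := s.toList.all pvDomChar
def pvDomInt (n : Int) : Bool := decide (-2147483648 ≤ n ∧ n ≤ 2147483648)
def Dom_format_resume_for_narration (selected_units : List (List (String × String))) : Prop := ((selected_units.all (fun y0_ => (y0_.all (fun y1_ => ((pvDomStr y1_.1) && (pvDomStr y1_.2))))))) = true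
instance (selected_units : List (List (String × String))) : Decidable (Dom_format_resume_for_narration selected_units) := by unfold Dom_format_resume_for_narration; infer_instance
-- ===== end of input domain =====

-- B replaces A's group-into-a-dict-then-consume structure by three filtered scans in the
-- fixed output order (simpler, no dict); return values are proved identical on all inputs.

-- ===== PORT A =====
-- unit.get(k, dflt) on the unit's association list (Python dict lookup, first match)
def pvUnitGet (unit : List (String × String)) (k dflt : String) : String :=
  (PySem.Dict.mk unit).getD k dflt

-- the grouping loop: sections[section] lists, built exactly as A does
def pvSectionsA (selected_units : List (List (String × String))) :
    PySem.Dict String (List (List (String × String))) :=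
  selected_units.foldl
    (fun d unit =>
      let sec := pvUnitGet unit "section" "experience"
      let d := if d.contains sec then d else d.insert sec []
      d.modify sec [] (fun l => l ++ [unit]))
    PySem.Dict.empty

-- the experience-unit rendering inside A's first for-loop
def pvRenderExpA (unit : List (String × String)) : String :=
  let org := pvUnitGet unit "org" ""
  let role := pvUnitGet unit "role" ""
  let text := pvUnitGet unit "text" ""
  if org ≠ "" ∧ role ≠ "" then "At " ++ org ++ " as " ++ role ++ ": " ++ text else text

def format_resume_for_narration (selected_units : List (List (String × String))) : String :=
  let sections := pvSectionsA selected_units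
  let narration_parts : List String := []
  let narration_parts :=
    if sections.contains "experience" then
      (sections.getD "experience" []).foldl
        (fun ps unit => ps ++ [pvRenderExpA unit])
        (narration_parts ++ ["Here's a summary of my professional experience:"])
    else narration_parts
  let narration_parts :=
    if sections.contains "projects" then
      (sections.getD "projects" []).foldl
        (fun ps unit => ps ++ [pvUnitGet unit "text" ""])
        (narration_parts ++ ["Some of my key projects include:"])
    else narration_parts
  let narration_parts :=
    if sections.contains "education" then
      (sections.getD "education" []).foldl
        (fun ps unit => ps ++ [pvUnitGet unit "text" ""])
        (narration_parts ++ ["Regarding my education:"])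
    else narration_parts
  PySem.Str.join " " narration_parts

-- ===== PORT B =====
-- B's ordered section spec: (section_name, header)
def pvSpecB : List (String × String) :=
  [("experience", "Here's a summary of my professional experience:"),
   ("projects", "Some of my key projects include:"),
   ("education", "Regarding my education:")]

-- B's per-unit rendering (experience formatting only when name == "experience")
def pvRenderB (name : String) (u : List (String × String)) : String :=
  if name == "experience" then
    let org := (PySem.Dict.mk u).getD "org" ""
    let role := (PySem.Dict.mk u).getD "role" ""
    let text := (PySem.Dict.mk u).getD "text" ""
    if org ≠ "" ∧ role ≠ "" then "At " ++ org ++ " as " ++ role ++ ": " ++ text else text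
  else (PySem.Dict.mk u).getD "text" ""

def format_resume_for_narration_alt (selected_units : List (List (String × String))) : String :=
  let parts :=
    pvSpecB.foldl
      (fun parts nh =>
        let filtered := selected_units.filter
          (fun u => (PySem.Dict.mk u).getD "section" "experience" == nh.1)
        if filtered.isEmpty then parts
        else parts ++ [nh.2] ++ filtered.map (pvRenderB nh.1))
      []
  PySem.Str.join " " parts

-- ===== PRECONDITION & SPEC =====
def Spec_format_resume_for_narration (selected_units : List (List (String × String))) (out : String) : Prop := out = format_resume_for_narration_alt selected_units
instance (selected_units : List (List (String × String))) (out : String) : Decidable (Spec_format_resume_for_narration selected_units out) := by unfold Spec_format_resume_for_narration; infer_instance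

-- ===== CLAIM (what is proved, stated in full; the proofs are below) =====
def Claim_equal_format_resume_for_narration : Prop := ∀ (selected_units : List (List (String × String))), Dom_format_resume_for_narration selected_units → Spec_format_resume_for_narration selected_units (format_resume_for_narration selected_units)

-- ===== LEMMAS AND PROOFS =====

-- appending one element per iteration is init ++ map
theorem pv_foldl_push {α β : Type} (f : α → β) (l : List α) (init : List β) :
    l.foldl (fun ps u => ps ++ [f u]) init = init ++ l.map f := by
  induction l generalizing init with
  | nil => simp
  | cons x xs ih => simp [List.foldl, ih, List.append_assoc]

-- invariant of A's grouping loop: the stored list at key c is the filter, membership is "any"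
theorem pvSectionsA_inv (l : List (List (String × String)))
    (d : PySem.Dict String (List (List (String × String)))) (c : String) :
    (l.foldl
      (fun d unit =>
        let sec := pvUnitGet unit "section" "experience"
        let d := if d.contains sec then d else d.insert sec []
        d.modify sec [] (fun l => l ++ [unit])) d).getD c []
      = d.getD c [] ++ (l.filter (fun u => pvUnitGet u "section" "experience" == c))
    ∧ (l.foldl
      (fun d unit =>
        let sec := pvUnitGet unit "section" "experience"
        let d := if d.contains sec then d else d.insert sec []
        d.modify sec [] (fun l => l ++ [unit])) d).contains c
      = (d.contains c || l.any (fun u => pvUnitGet u "section" "experience" == c)) := by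
  induction l generalizing d with
  | nil => simp
  | cons u us ih =>
    simp only [List.foldl, List.filter, List.any]
    rcases ih ((if d.contains (pvUnitGet u "section" "experience") then d
        else d.insert (pvUnitGet u "section" "experience") [])
        |>.modify (pvUnitGet u "section" "experience") [] (fun l => l ++ [u])) with ⟨h1, h2⟩
    by_cases hc : pvUnitGet u "section" "experience" = c
    · have hbeq : (pvUnitGet u "section" "experience" == c) = true := by simpa using hc
      subst hc
      constructor
      · rw [h1]
        by_cases h : d.contains (pvUnitGet u "section" "experience")
        · rw [if_pos h, PySem.Dict.getD_modify_self]
          simp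
        · have hf : d.contains (pvUnitGet u "section" "experience") = false := by
            simpa using h
          rw [if_neg h, PySem.Dict.getD_modify_self, PySem.Dict.getD_insert_self]
          simp [PySem.Dict.getD_of_not_contains, hf]
      · rw [h2]
        by_cases h : d.contains (pvUnitGet u "section" "experience")
        · rw [if_pos h]
          simp [PySem.Dict.contains_modify, h]
        · rw [if_neg h]
          simp [PySem.Dict.contains_modify]
    · have hbeq : (pvUnitGet u "section" "experience" == c) = false := by simpa using hc
      have hne : c ≠ pvUnitGet u "section" "experience" := Ne.symm hc
      constructor
      · rw [h1]
        simp only [hbeq]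
        rw [PySem.Dict.getD_modify]
        simp only [if_neg hne]
        split_ifs with h
        · rfl
        · rw [PySem.Dict.getD_insert, if_neg hne]
      · rw [h2]
        simp only [hbeq]
        rw [PySem.Dict.contains_modify]
        have hb' : (c == pvUnitGet u "section" "experience") = false := by simpa using hne
        simp only [hb', Bool.false_or]
        split_ifs with h
        · rfl
        · rw [PySem.Dict.contains_insert]
          simp [hb']

theorem pvSectionsA_getD (l : List (List (String × String))) (c : String) :
    (pvSectionsA l).getD c [] = l.filter (fun u => pvUnitGet u "section" "experience" == c) := by
  have := (pvSectionsA_inv l PySem.Dict.empty c).1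
  simpa [pvSectionsA] using this

theorem pvSectionsA_contains (l : List (List (String × String))) (c : String) :
    (pvSectionsA l).contains c = l.any (fun u => pvUnitGet u "section" "experience" == c) := by
  have := (pvSectionsA_inv l PySem.Dict.empty c).2
  simpa [pvSectionsA] using this

-- B's renderers at the three literal section names
theorem pvRenderB_exp : pvRenderB "experience" = pvRenderExpA := by
  funext u; simp [pvRenderB, pvRenderExpA, pvUnitGet]

theorem pvRenderB_proj : pvRenderB "projects" = fun u => pvUnitGet u "text" "" := by
  funext u; simp [pvRenderB, pvUnitGet]

theorem pvRenderB_edu : pvRenderB "education" = fun u => pvUnitGet u "text" "" := by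
  funext u; simp [pvRenderB, pvUnitGet]

-- filter-is-empty ↔ any-is-false, to align B's guards with A's contains tests
theorem pv_filter_nil {α : Type} (p : α → Bool) (l : List α) :
    (List.filter p l = []) ↔ (l.any p = false) := by
  simp [List.filter_eq_nil_iff, List.any_eq_false]

-- ===== VERDICT (by name: the statement is the Claim_ definition above) =====
theorem format_resume_for_narration_spec : Claim_equal_format_resume_for_narration := by
  intro l _
  show format_resume_for_narration l = format_resume_for_narration_alt l
  unfold format_resume_for_narration format_resume_for_narration_alt pvSpecB
  simp only [List.foldl, pv_foldl_push, pvSectionsA_getD, pvSectionsA_contains,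
    pvRenderB_exp, pvRenderB_proj, pvRenderB_edu, pvUnitGet,
    List.isEmpty_iff, pv_filter_nil]
  congr 1
  by_cases he : l.any (fun u => (PySem.Dict.mk u).getD "section" "experience" == "experience") = true <;>
  by_cases hp : l.any (fun u => (PySem.Dict.mk u).getD "section" "experience" == "projects") = true <;>
  by_cases hd : l.any (fun u => (PySem.Dict.mk u).getD "section" "experience" == "education") = true <;>
    simp only [Bool.not_eq_true] at he hp hd <;>
    simp [he, hp, hd, List.append_assoc]
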